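-- pv_equiv track=rewrite | github.com/isekovanic/advent-of-code | 2025/Day 10/p2.py | collect_system
-- ===== SOURCE A (Python) =====
-- import string
-- from collections import defaultdict
--
-- def collect_system(configuration, buttons):
--     left_hands = defaultdict(list)
--
--     for idx, button in enumerate(buttons):
--         variable = string.ascii_lowercase[idx]
--         for eq in button:
--             left_hands[eq].append(variable)
--
--     equations = []
--
--     for idx, right_hand in enumerate(configuration):
--         equations.append((left_hands[idx], right_hand))
--
--     return equations
-- ===== SOURCE B (Python) =====
-- import string
--
-- def collect_system(configuration, buttons):
--     # Per-equation direct computation: for each equation index i, build its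
--     # variable list by scanning the buttons and repeating each button's letter
--     # as many times as i occurs in that button (multiplicity via count).
--     return [
--         ([string.ascii_lowercase[j]
--           for j, button in enumerate(buttons)
--           for _ in range(button.count(i))], rh)
--         for i, rh in enumerate(configuration)
--     ]
-- ===== Notes on version B (the rewrite author's own statement) =====
-- stated objective: alternative
-- what changed: Inverts the traversal: instead of grouping button letters into a defaultdict keyed by equation index and then rebuilding, B computes each equation's variable list directly by scanning the buttons per equation index and repeating each letter by its occurrence count, so no intermediate grouping structure exists.
import Mathlib
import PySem

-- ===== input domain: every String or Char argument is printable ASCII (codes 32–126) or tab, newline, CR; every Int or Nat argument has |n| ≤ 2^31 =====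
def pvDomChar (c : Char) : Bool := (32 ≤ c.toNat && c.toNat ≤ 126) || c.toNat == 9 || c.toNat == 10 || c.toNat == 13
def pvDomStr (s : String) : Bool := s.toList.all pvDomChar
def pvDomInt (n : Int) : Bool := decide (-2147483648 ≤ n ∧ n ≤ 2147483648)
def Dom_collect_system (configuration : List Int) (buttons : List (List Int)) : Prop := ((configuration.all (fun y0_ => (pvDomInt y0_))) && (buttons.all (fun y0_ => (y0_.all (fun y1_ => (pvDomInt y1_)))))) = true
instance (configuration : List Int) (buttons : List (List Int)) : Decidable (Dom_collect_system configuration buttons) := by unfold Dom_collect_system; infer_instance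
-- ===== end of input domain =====

-- B inverts the traversal: no intermediate grouping dict — each equation's variable
-- list is computed directly by scanning the buttons with an occurrence count
-- (alternative decomposition; not faster).

-- string.ascii_lowercase[idx]; both Pythons evaluate exactly this expression
-- (total form via getD: Python raises IndexError iff idx >= 26, excluded by Pre_).
def pvLetter (idx : Int) : String :=
  ((PySem.Str.pyGet? "abcdefghijklmnopqrstuvwxyz" idx).map (fun c => String.ofList [c])).getD ""

-- ===== PORT A =====
def collect_system (configuration : List Int) (buttons : List (List Int)) : List (List String × Int) :=
  let left_hands : PySem.Dict Int (List String) :=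
    (PySem.List.enumerate buttons).foldl
      (fun d p =>
        let variable_ := pvLetter p.1
        p.2.foldl (fun d eq => d.modify eq [] (fun l => l ++ [variable_])) d)
      PySem.Dict.empty
  (PySem.List.enumerate configuration).foldl
    (fun equations p => equations ++ [(left_hands.getD p.1 [], p.2)]) []

-- ===== PORT B =====
def collect_system_alt (configuration : List Int) (buttons : List (List Int)) : List (List String × Int) :=
  (PySem.List.enumerate configuration).map (fun p =>
    ((PySem.List.enumerate buttons).flatMap
        (fun q => List.replicate (PySem.List.count q.2 p.1) (pvLetter q.1)),
     p.2))

-- ===== PRECONDITION & SPEC =====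
-- A raises IndexError on string.ascii_lowercase[idx] once there are more than 26 buttons.
def Pre_collect_system (_configuration : List Int) (buttons : List (List Int)) : Prop :=
  buttons.length ≤ 26
instance (configuration : List Int) (buttons : List (List Int)) : Decidable (Pre_collect_system configuration buttons) := by unfold Pre_collect_system; infer_instance
def pvWitness_collect_system : List Int × List (List Int) := ([3, 5], [[0, 1], [1]])

def Spec_collect_system (configuration : List Int) (buttons : List (List Int)) (out : List (List String × Int)) : Prop := out = collect_system_alt configuration buttons
instance (configuration : List Int) (buttons : List (List Int)) (out : List (List String × Int)) : Decidable (Spec_collect_system configuration buttons out) := by unfold Spec_collect_system; infer_instance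

-- ===== CLAIM (what is proved, stated in full; the proofs are below) =====
def Claim_equal_collect_system : Prop := ∀ (configuration : List Int) (buttons : List (List Int)), Dom_collect_system configuration buttons → Pre_collect_system configuration buttons → Spec_collect_system configuration buttons (collect_system configuration buttons)

-- ===== LEMMAS AND PROOFS =====

-- A's inner loop over one button appends the letter once per occurrence of the key.
theorem pv_inner_getD (eqs : List Int) (v : String) (d : PySem.Dict Int (List String)) (k : Int) :
    (eqs.foldl (fun d eq => d.modify eq [] (fun l => l ++ [v])) d).getD k []
      = d.getD k [] ++ List.replicate (eqs.count k) v := by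
  induction eqs generalizing d with
  | nil => simp
  | cons e es ih =>
    rw [List.foldl_cons, ih, PySem.Dict.getD_modify]
    by_cases h : k = e
    · subst h
      simp [List.replicate_succ, List.append_assoc]
    · have h' : (e == k) = false := beq_eq_false_iff_ne.mpr (Ne.symm h)
      simp [h, List.count_cons, h']

-- A's outer loop: the dict entry at k is the concatenation, over the enumerated
-- buttons, of each button's letter replicated by the count of k in that button.
theorem pv_outer_getD (ps : List (Int × List Int)) (d : PySem.Dict Int (List String)) (k : Int) :
    (ps.foldl (fun d p => p.2.foldl (fun d eq => d.modify eq [] (fun l => l ++ [pvLetter p.1])) d) d).getD k []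
      = d.getD k [] ++ ps.flatMap (fun q => List.replicate (q.2.count k) (pvLetter q.1)) := by
  induction ps generalizing d with
  | nil => simp
  | cons p ps ih =>
    rw [List.foldl_cons, ih, pv_inner_getD]
    simp [List.append_assoc]

-- ===== VERDICT (by name: the statement is the Claim_ definition above) =====
theorem collect_system_spec : Claim_equal_collect_system := by
  intro configuration buttons _ _
  unfold Spec_collect_system collect_system collect_system_alt
  rw [PySem.List.foldl_append_singleton_eq_map, List.nil_append]
  refine List.map_congr_left (fun p _ => ?_)
  rw [pv_outer_getD]
  have hempty : (PySem.Dict.empty : PySem.Dict Int (List String)).getD p.1 [] = [] := rfl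
  rw [hempty, List.nil_append]
  simp [PySem.List.count_eq]
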